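-- pv_equiv track=rewrite | github.com/Alferdize/Data-Structure-and-Algorithms | Algorithms/binary_search.com/Ghost.py | solve
-- ===== SOURCE A (Python) =====
-- _end = '.'
--
-- def minmax(tr):
--     if _end in tr:
--         return True
--     return any(not minmax(t) for t in tr.values())
--
-- def solve(words):
--     trie = dict()
--     for word in words:
--         current_dict = trie
--         for letter in word:
--             current_dict = current_dict.setdefault(letter, {})
--         current_dict[_end] = True
--     return minmax(trie)
-- ===== SOURCE B (Python) =====
-- def solve(words):
--     # mark the end of each word with the terminator the input format reserves ('.'),
--     # then recurse on suffix lists, partitioning by first character: a reachable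
--     # terminator means the current prefix completes a word.
--     def win(suffixes):
--         if not suffixes:
--             return False
--         if any(s[0] == '.' for s in suffixes):
--             return True
--         c = suffixes[0][0]
--         bucket = [s[1:] for s in suffixes if s[0] == c]
--         others = [s for s in suffixes if s[0] != c]
--         return (not win(bucket)) or win(others)
--     return win([w + '.' for w in words])
-- ===== Notes on version B (the rewrite author's own statement) =====
-- stated objective: simpler
-- what changed: B builds no trie at all: instead of inserting every word into a dict-trie of dicts and running a minmax walk over it, it appends the reserved '.' terminator to each word and recurses on suffix lists, partitioning by first character (bucket vs. the rest) and combining the results directly.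
import Mathlib
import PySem

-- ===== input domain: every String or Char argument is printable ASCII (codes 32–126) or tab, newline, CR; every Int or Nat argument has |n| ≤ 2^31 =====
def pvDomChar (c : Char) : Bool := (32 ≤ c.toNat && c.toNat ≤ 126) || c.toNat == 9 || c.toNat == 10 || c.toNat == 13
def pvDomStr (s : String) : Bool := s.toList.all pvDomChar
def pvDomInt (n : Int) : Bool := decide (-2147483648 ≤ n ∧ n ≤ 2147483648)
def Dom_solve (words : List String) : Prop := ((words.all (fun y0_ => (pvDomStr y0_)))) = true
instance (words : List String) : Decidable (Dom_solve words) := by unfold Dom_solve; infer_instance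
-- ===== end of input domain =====

-- B builds no trie: it marks word ends with the reserved '.' terminator and recurses on
-- suffix lists, partitioning by first character (objective: simpler — no dict-trie is built).

-- ===== PORT A =====
-- A's trie is a Python dict whose values are sub-dicts or True (True only ever appears under
-- the sentinel key '.').  Modelled exactly: a node is an insertion-ordered association list,
-- a value is `top` (Python's True) or a sub-node.
mutual
inductive PvVal where
  | top : PvVal
  | nd : PvNode → PvVal
inductive PvNode where
  | nil : PvNode
  | cons : Char → PvVal → PvNode → PvNode
end

-- `current_dict[_end] = True`: assignment — overwrite in place, else append (dict order)
def pvAssignEnd : PvNode → PvNode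
  | PvNode.nil => PvNode.cons '.' PvVal.top PvNode.nil
  | PvNode.cons c v t =>
      if c = '.' then PvNode.cons c PvVal.top t
      else PvNode.cons c v (pvAssignEnd t)

mutual
-- the `for letter in word` loop + final assignment; none = Python raises
-- (setdefault returned True, i.e. `.setdefault`/`[...]=` on a bool)
def pvInsert? : List Char → PvNode → Option PvNode
  | [], n => some (pvAssignEnd n)
  | c :: r, n => pvStep? c r n
  termination_by w _ => (w.length, 0, 0)
-- `current_dict = current_dict.setdefault(letter, {})`, then the rest of the loop
def pvStep? : Char → List Char → PvNode → Option PvNode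
  | c, r, PvNode.nil => (pvInsert? r PvNode.nil).map (fun m => PvNode.cons c (PvVal.nd m) PvNode.nil)
  | c, r, PvNode.cons c' v t =>
      if c' = c then
        match v with
        | PvVal.top => none
        | PvVal.nd m => (pvInsert? r m).map (fun m' => PvNode.cons c' (PvVal.nd m') t)
      else (pvStep? c r t).map (fun t' => PvNode.cons c' v t')
  termination_by _ r n => (r.length, 1, sizeOf n)
end

-- `_end in tr`
def pvHasEnd : PvNode → Bool
  | PvNode.nil => false
  | PvNode.cons c _ t => c == '.' || pvHasEnd t

mutual
-- `minmax`: `_end in tr` first, else `any(not minmax(t) for t in tr.values())`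
def pvMinmax (n : PvNode) : Bool := if pvHasEnd n then true else pvAnyNot n
  termination_by (sizeOf n, 1)
def pvAnyNot : PvNode → Bool
  | PvNode.nil => false
  | PvNode.cons _ v t => (!pvValMm v) || pvAnyNot t
  termination_by n => (sizeOf n, 0)
def pvValMm : PvVal → Bool
  | PvVal.top => true  -- unreachable from solve: True only sits under '.', and pvHasEnd cut first
  | PvVal.nd m => pvMinmax m
  termination_by v => (sizeOf v, 1)
end

def solve (words : List String) : Bool :=
  match words.foldl (fun o w => o.bind (pvInsert? w.toList)) (some PvNode.nil) with
  | none => false   -- unreachable under Pre_solve: Python raises there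
  | some tr => pvMinmax tr

-- ===== PORT B =====
-- Source B's `win`: recursion on '.'-marked suffix lists, partitioning by first character.
-- `fuel` is only a totality guard; solve_alt supplies more than the total size, so 0 is never hit.
def pvWin : Nat → List (List Char) → Bool
  | 0, _ => false
  | _ + 1, [] => false
  | f + 1, s :: L' =>
    if (s :: L').any (fun t => t.head? == some '.') then true
    else
      match s with
      | [] => false  -- unreachable: marked suffixes are never empty
      | c :: _ =>
        (!pvWin f ((s :: L').filterMap (fun t => match t with
                                                 | [] => none
                                                 | c' :: r => if c' = c then some r else none)))
        || pvWin f ((s :: L').filter (fun t => t.head? ≠ some c))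

def solve_alt (words : List String) : Bool :=
  let M := words.map (fun w => w.toList ++ ['.'])
  pvWin (M.foldl (fun n s => n + s.length) 0 + M.length + 1) M

-- ===== PRECONDITION & SPEC =====
-- Pre_ excludes exactly the inputs where A raises (TypeError/AttributeError): some earlier
-- word followed by the sentinel '.' is a prefix of a later word, so A's walk runs into the
-- stored True.  On every other input (including words containing '.') A returns and B matches.
def Pre_solve (words : List String) : Prop :=
  List.Pairwise (fun u v => ¬ ((u.toList ++ ['.']) <+: v.toList)) words
instance (words : List String) : Decidable (Pre_solve words) := by unfold Pre_solve; infer_instance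
def pvWitness_solve : List String := (["cat", "car", "dog", ""])

def Spec_solve (words : List String) (out : Bool) : Prop := out = solve_alt words
instance (words : List String) (out : Bool) : Decidable (Spec_solve words out) := by unfold Spec_solve; infer_instance

-- ===== CLAIM (what is proved, stated in full; the proofs are below) =====
def Claim_equal_solve : Prop := ∀ (words : List String), Dom_solve words → Pre_solve words → Spec_solve words (solve words)

-- ===== LEMMAS AND PROOFS =====

-- key class of a word at a node: its first character, or the sentinel for the empty word
def pvKey (w : List Char) : Char := w.head?.getD '.'

def pvMark (w : List Char) : List Char := w ++ ['.']

def pvSumLen (L : List (List Char)) : Nat := (L.map List.length).sum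

def pvM (W : List (List Char)) : Nat := pvSumLen W + W.length

-- the words routed into key c, minus that first character
def pvBucketW (c : Char) (W : List (List Char)) : List (List Char) :=
  W.filterMap (fun w => match w with
                        | [] => none
                        | c' :: r => if c' = c then some r else none)

-- the words not routed into key c
def pvOthersW (c : Char) (W : List (List Char)) : List (List Char) :=
  W.filter (fun w => pvKey w ≠ c)

-- A's whole construction fold, over an optional (raised?) state
def pvF (W : List (List Char)) (o : Option PvNode) : Option PvNode :=
  W.foldl (fun o w => o.bind (pvInsert? w)) o

-- the trie A builds from W (under Pre_), described by the bucket decomposition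
def pvBuildN : Nat → List (List Char) → PvNode
  | 0, _ => PvNode.nil
  | _ + 1, [] => PvNode.nil
  | f + 1, w :: W' =>
    let c := pvKey w
    PvNode.cons c
      (if c = '.' then
        (if (w :: W').contains [] then PvVal.top else PvVal.nd (pvBuildN f (pvBucketW '.' (w :: W'))))
       else PvVal.nd (pvBuildN f (pvBucketW c (w :: W'))))
      (pvBuildN f (pvOthersW c (w :: W')))

-- —— basic fold facts ——

theorem pvF_none (W : List (List Char)) : pvF W none = none := by
  induction W with
  | nil => rfl
  | cons w W ih => simpa [pvF, List.foldl_cons] using ih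

theorem pvF_cons (w : List Char) (W : List (List Char)) (o : Option PvNode) :
    pvF (w :: W) o = pvF W (o.bind (pvInsert? w)) := rfl

-- equation lemmas for the well-founded insert recursion
theorem pvIns_nilw (n : PvNode) : pvInsert? [] n = some (pvAssignEnd n) := by rw [pvInsert?]

theorem pvIns_cons (c : Char) (r : List Char) (n : PvNode) :
    pvInsert? (c :: r) n = pvStep? c r n := by rw [pvInsert?]

theorem pvStep_nil (c : Char) (r : List Char) :
    pvStep? c r PvNode.nil
      = (pvInsert? r PvNode.nil).map (fun m => PvNode.cons c (PvVal.nd m) PvNode.nil) := by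
  rw [pvStep?]

theorem pvStep_eq_nd (c : Char) (r : List Char) (m t : PvNode) :
    pvStep? c r (PvNode.cons c (PvVal.nd m) t)
      = (pvInsert? r m).map (fun m' => PvNode.cons c (PvVal.nd m') t) := by
  rw [pvStep?]
  simp

theorem pvStep_ne (c c' : Char) (h : c' ≠ c) (r : List Char) (v : PvVal) (t : PvNode) :
    pvStep? c r (PvNode.cons c' v t) = (pvStep? c r t).map (fun t' => PvNode.cons c' v t') := by
  rw [pvStep?.eq_def]
  simp [h]

-- the path trie a single word builds in an empty dict
def pvSingle : List Char → PvNode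
  | [] => PvNode.cons '.' PvVal.top PvNode.nil
  | c :: r => PvNode.cons c (PvVal.nd (pvSingle r)) PvNode.nil

theorem pvInsert?_nil (r : List Char) : pvInsert? r PvNode.nil = some (pvSingle r) := by
  induction r with
  | nil => simp [pvIns_nilw, pvAssignEnd, pvSingle]
  | cons c r ih => rw [pvIns_cons, pvStep_nil, ih]; rfl

-- —— measure lemmas ——

theorem pv_bucket_size (c : Char) (W : List (List Char)) :
    pvSumLen (pvBucketW c W) + (pvBucketW c W).length ≤ pvSumLen W := by
  induction W with
  | nil => simp [pvBucketW, pvSumLen]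
  | cons w W ih =>
    cases w with
    | nil => simpa [pvBucketW, pvSumLen] using ih
    | cons c' r =>
      by_cases h : c' = c
      · simp only [pvBucketW, List.filterMap_cons, h] at *
        simp [pvSumLen] at *
        omega
      · simp only [pvBucketW, List.filterMap_cons, h] at *
        simp [pvSumLen] at *
        omega

theorem pv_others_sum (c : Char) (W : List (List Char)) :
    pvSumLen (pvOthersW c W) ≤ pvSumLen W := by
  induction W with
  | nil => simp [pvOthersW]
  | cons w W ih =>
    by_cases h : pvKey w ≠ c
    · simp [pvOthersW, h, pvSumLen] at *; omega
    · simp [pvOthersW, h, pvSumLen] at *; omega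

theorem pv_others_cons_self (c : Char) (w : List Char) (W : List (List Char)) (h : pvKey w = c) :
    pvOthersW c (w :: W) = pvOthersW c W := by
  simp [pvOthersW, h]

-- —— peel lemmas: how A's fold acts on the first stored key ——

theorem pvPeelA (W : List (List Char)) : ∀ (c : Char), c ≠ '.' → ∀ (m : PvNode) (tail : PvNode),
    pvF W (some (PvNode.cons c (PvVal.nd m) tail))
      = (pvF (pvBucketW c W) (some m)).bind (fun m' =>
          (pvF (pvOthersW c W) (some tail)).map (fun t' => PvNode.cons c (PvVal.nd m') t')) := by
  induction W with
  | nil => intro c hc m tail; rfl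
  | cons w W ih =>
    intro c hc m tail
    cases w with
    | nil =>
      have hb : pvBucketW c ([] :: W) = pvBucketW c W := by simp [pvBucketW]
      have ho : pvOthersW c ([] :: W) = [] :: pvOthersW c W := by
        simp [pvOthersW, pvKey, hc.symm]
      rw [pvF_cons, Option.bind_some, pvIns_nilw]
      have hAe : pvAssignEnd (PvNode.cons c (PvVal.nd m) tail)
          = PvNode.cons c (PvVal.nd m) (pvAssignEnd tail) := by simp [pvAssignEnd, hc]
      rw [hAe, ih c hc m (pvAssignEnd tail), hb, ho, pvF_cons, Option.bind_some, pvIns_nilw]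
    | cons c' r =>
      by_cases h : c' = c
      · subst h
        have hb : pvBucketW c' ((c' :: r) :: W) = r :: pvBucketW c' W := by simp [pvBucketW]
        rw [pvF_cons, Option.bind_some, pvIns_cons, pvStep_eq_nd, hb, pvF_cons, Option.bind_some,
            pv_others_cons_self c' (c' :: r) W (by simp [pvKey])]
        cases hins : pvInsert? r m with
        | none => simp [pvF_none]
        | some m2 => simpa using ih c' hc m2 tail
      · have hb : pvBucketW c ((c' :: r) :: W) = pvBucketW c W := by simp [pvBucketW, h]
        have ho : pvOthersW c ((c' :: r) :: W) = (c' :: r) :: pvOthersW c W := by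
          simp [pvOthersW, pvKey, h]
        rw [pvF_cons, Option.bind_some, pvIns_cons,
            pvStep_ne c' c (fun hh => h hh.symm) r _ tail, hb, ho, pvF_cons, Option.bind_some,
            pvIns_cons]
        cases hins : pvStep? c' r tail with
        | none =>
          simp only [Option.map_none, pvF_none]
          cases pvF (pvBucketW c W) (some m) <;> simp
        | some t2 =>
          simp only [Option.map_some]
          simpa using ih c hc m t2

theorem pvPeelDotTop (W : List (List Char)) : ∀ (tail : PvNode),
    (∀ w ∈ W, w.head? ≠ some '.') →
    pvF W (some (PvNode.cons '.' PvVal.top tail))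
      = (pvF (pvOthersW '.' W) (some tail)).map (fun t' => PvNode.cons '.' PvVal.top t') := by
  induction W with
  | nil => intro tail _; rfl
  | cons w W ih =>
    intro tail hW
    cases w with
    | nil =>
      have ho : pvOthersW '.' ([] :: W) = pvOthersW '.' W := by
        simp [pvOthersW, pvKey]
      rw [pvF_cons, Option.bind_some, pvIns_nilw]
      have hAe : pvAssignEnd (PvNode.cons '.' PvVal.top tail)
          = PvNode.cons '.' PvVal.top tail := by simp [pvAssignEnd]
      rw [hAe, ho]
      exact ih tail (fun w hw => hW w (List.mem_cons_of_mem _ hw))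
    | cons c' r =>
      have hc' : c' ≠ '.' := by
        have := hW (c' :: r) List.mem_cons_self
        simpa using this
      have ho : pvOthersW '.' ((c' :: r) :: W) = (c' :: r) :: pvOthersW '.' W := by
        simp [pvOthersW, pvKey, hc']
      rw [pvF_cons, Option.bind_some, pvIns_cons, pvStep_ne c' '.' (Ne.symm hc') r _ tail, ho,
          pvF_cons, Option.bind_some, pvIns_cons]
      cases hins : pvStep? c' r tail with
      | none => simp [pvF_none]
      | some t2 =>
        simp only [Option.map_some]
        simpa using ih t2 (fun w hw => hW w (List.mem_cons_of_mem _ hw))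

-- no word before a '.'-headed word is empty (what Pre_ guarantees at a '.' node)
def pvOrd (W : List (List Char)) : Prop :=
  List.Pairwise (fun u v => u = [] → v.head? ≠ some '.') W

theorem pv_no_dot_bucket (W : List (List Char)) (h : ∀ w ∈ W, w.head? ≠ some '.') :
    pvBucketW '.' W = [] := by
  induction W with
  | nil => rfl
  | cons w W ih =>
    have hw := h w List.mem_cons_self
    have ih' := ih (fun w hw => h w (List.mem_cons_of_mem _ hw))
    cases w with
    | nil => simpa [pvBucketW] using ih'
    | cons c r =>
      have : c ≠ '.' := by simpa using hw
      simpa [pvBucketW, this] using ih'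

theorem pvPeelDotND (W : List (List Char)) : ∀ (m : PvNode) (tail : PvNode), pvOrd W →
    pvF W (some (PvNode.cons '.' (PvVal.nd m) tail))
      = (pvF (pvBucketW '.' W) (some m)).bind (fun m' =>
          (pvF (pvOthersW '.' W) (some tail)).map (fun t' =>
            PvNode.cons '.' (if W.contains [] then PvVal.top else PvVal.nd m') t')) := by
  induction W with
  | nil => intro m tail _; rfl
  | cons w W ih =>
    intro m tail hord
    rw [pvOrd, List.pairwise_cons] at hord
    cases w with
    | nil =>
      have hnd : ∀ w ∈ W, w.head? ≠ some '.' := fun w hw => hord.1 w hw rfl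
      have hb : pvBucketW '.' ([] :: W) = ([] : List (List Char)) := by
        have := pv_no_dot_bucket W hnd
        simpa [pvBucketW] using this
      have ho : pvOthersW '.' ([] :: W) = pvOthersW '.' W := by
        simp [pvOthersW, pvKey]
      rw [pvF_cons, Option.bind_some, pvIns_nilw]
      have hAe : pvAssignEnd (PvNode.cons '.' (PvVal.nd m) tail)
          = PvNode.cons '.' PvVal.top tail := by simp [pvAssignEnd]
      rw [hAe, pvPeelDotTop W tail hnd, hb, ho]
      simp [pvF]
    | cons c' r =>
      by_cases h : c' = '.'
      · subst h
        have hb : pvBucketW '.' (('.' :: r) :: W) = r :: pvBucketW '.' W := by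
          simp [pvBucketW]
        have ho : pvOthersW '.' (('.' :: r) :: W) = pvOthersW '.' W := by
          simp [pvOthersW, pvKey]
        have hcont : (('.' :: r) :: W).contains ([] : List Char) = W.contains [] := by
          simp
        rw [pvF_cons, Option.bind_some, pvIns_cons, pvStep_eq_nd, hb, ho, pvF_cons,
            Option.bind_some, hcont]
        cases hins : pvInsert? r m with
        | none => simp [pvF_none]
        | some m2 => simpa using ih m2 tail hord.2
      · have hb : pvBucketW '.' ((c' :: r) :: W) = pvBucketW '.' W := by
          simp [pvBucketW, h]
        have ho : pvOthersW '.' ((c' :: r) :: W) = (c' :: r) :: pvOthersW '.' W := by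
          simp [pvOthersW, pvKey, h]
        have hcont : ((c' :: r) :: W).contains ([] : List Char) = W.contains [] := by
          simp
        rw [pvF_cons, Option.bind_some, pvIns_cons, pvStep_ne c' '.' (fun hh => h hh.symm) r _ tail, hb, ho,
            pvF_cons, Option.bind_some, pvIns_cons, hcont]
        cases hins : pvStep? c' r tail with
        | none =>
          simp only [Option.map_none, pvF_none]
          cases pvF (pvBucketW '.' W) (some m) <;> simp
        | some t2 =>
          simp only [Option.map_some]
          simpa using ih m t2 hord.2

-- —— Pre_ descends to buckets and leftovers ——

def pvPre (W : List (List Char)) : Prop :=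
  List.Pairwise (fun u v => ¬ (pvMark u <+: v)) W

theorem pvPre_others (c : Char) (W : List (List Char)) (h : pvPre W) : pvPre (pvOthersW c W) :=
  List.Pairwise.filter _ h

theorem pvPre_bucket (c : Char) (W : List (List Char)) (h : pvPre W) : pvPre (pvBucketW c W) := by
  rw [pvPre, pvBucketW, List.pairwise_filterMap]
  refine h.imp_of_mem ?_
  intro u v hu hv huv u' hu' v' hv'
  cases u with
  | nil => simp at hu'
  | cons cu ru =>
    cases v with
    | nil => simp at hv'
    | cons cv rv =>
      by_cases h1 : cu = c
      · by_cases h2 : cv = c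
        · have hu2 : ru = u' := by simpa [h1] using hu'
          have hv2 : rv = v' := by simpa [h2] using hv'
          subst hu2
          subst hv2
          intro hpre
          apply huv
          have hm : pvMark (cu :: ru) = cu :: pvMark ru := by simp [pvMark]
          rw [hm, show cu = cv from h1.trans h2.symm]
          exact (List.prefix_cons_inj cv).2 hpre
        · simp [h2] at hv'
      · simp [h1] at hu'

theorem pvPre_ord (W : List (List Char)) (h : pvPre W) : pvOrd W := by
  refine h.imp ?_
  intro u v huv hu hv
  subst hu
  cases v with
  | nil => simp at hv
  | cons cv rv =>
    simp at hv
    subst hv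
    exact huv (by simp [pvMark])

-- —— the fold builds exactly pvBuildN (and never raises) under Pre_ ——

theorem pvBuild : ∀ (fuel : Nat) (W : List (List Char)), pvM W < fuel → pvPre W →
    pvF W (some PvNode.nil) = some (pvBuildN fuel W) := by
  intro fuel
  induction fuel with
  | zero => intro W h; omega
  | succ f ih =>
    intro W hm hpre
    match W with
    | [] => rfl
    | w :: W' =>
      rw [pvPre, List.pairwise_cons] at hpre
      have hsum : pvSumLen (w :: W') = w.length + pvSumLen W' := by simp [pvSumLen]
      have hlen : (w :: W').length = W'.length + 1 := by simp
      cases w with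
      | nil =>
        have hnd : ∀ v ∈ W', v.head? ≠ some '.' := by
          intro v hv hh
          cases v with
          | nil => simp at hh
          | cons cv rv =>
            simp at hh
            subst hh
            exact hpre.1 _ hv (by simp [pvMark])
        have hoW : pvOthersW '.' ([] :: W') = pvOthersW '.' W' := by simp [pvOthersW, pvKey]
        have hOs := pv_others_sum '.' W'
        have hOl : (pvOthersW '.' W').length ≤ W'.length := List.length_filter_le _ _
        rw [pvF_cons, Option.bind_some, pvIns_nilw]
        have hAe : pvAssignEnd PvNode.nil = PvNode.cons '.' PvVal.top PvNode.nil := rfl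
        rw [hAe, pvPeelDotTop W' PvNode.nil hnd,
            ih (pvOthersW '.' W') (by simp [pvM] at *; omega) (pvPre_others '.' W' hpre.2)]
        show some (PvNode.cons '.' PvVal.top (pvBuildN f (pvOthersW '.' W'))) = _
        rw [show pvOthersW '.' W' = pvOthersW '.' ([] :: W') from hoW.symm]
        simp [pvBuildN, pvKey]
      | cons c r =>
        have hb : pvBucketW c ((c :: r) :: W') = r :: pvBucketW c W' := by simp [pvBucketW]
        have hBs := pv_bucket_size c ((c :: r) :: W')
        have hOs := pv_others_sum c W'
        have hOl : (pvOthersW c W').length ≤ W'.length := List.length_filter_le _ _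
        have hmB : pvM (pvBucketW c ((c :: r) :: W')) < f := by
          simp [pvM, pvSumLen] at *; omega
        have hmO : pvM (pvOthersW c W') < f := by
          simp [pvM] at *; omega
        have hpreB := pvPre_bucket c ((c :: r) :: W') (List.pairwise_cons.mpr hpre)
        have hpreO := pvPre_others c W' hpre.2
        have hBuildB := ih (pvBucketW c ((c :: r) :: W')) hmB hpreB
        have hBuildO := ih (pvOthersW c W') hmO hpreO
        have hfold : pvF (pvBucketW c W') (some (pvSingle r))
            = some (pvBuildN f (pvBucketW c ((c :: r) :: W'))) := by
          rw [← hBuildB, hb, pvF_cons, Option.bind_some, pvInsert?_nil]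
        by_cases hc : c = '.'
        · subst hc
          have hord : pvOrd W' := pvPre_ord W' hpre.2
          rw [pvF_cons, Option.bind_some, pvIns_cons, pvStep_nil, pvInsert?_nil,
              Option.map_some, pvPeelDotND W' (pvSingle r) PvNode.nil hord, hfold, hBuildO]
          show some (PvNode.cons '.' _ _) = _
          rw [show pvOthersW '.' W' = pvOthersW '.' (('.' :: r) :: W') from
                (pv_others_cons_self '.' ('.' :: r) W' (by simp [pvKey])).symm]
          simp [pvBuildN, pvKey]
        · rw [pvF_cons, Option.bind_some, pvIns_cons, pvStep_nil, pvInsert?_nil,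
              Option.map_some, pvPeelA W' c hc (pvSingle r) PvNode.nil, hfold, hBuildO]
          show some (PvNode.cons c (PvVal.nd _) _) = _
          rw [show pvOthersW c W' = pvOthersW c ((c :: r) :: W') from
                (pv_others_cons_self c (c :: r) W' (by simp [pvKey])).symm]
          simp [pvBuildN, pvKey, hc]

-- —— minmax equations ——

theorem pvMinmax_eq (n : PvNode) : pvMinmax n = if pvHasEnd n then true else pvAnyNot n := by
  rw [pvMinmax]

theorem pvAnyNot_nil : pvAnyNot PvNode.nil = false := by rw [pvAnyNot]

theorem pvAnyNot_cons (c : Char) (v : PvVal) (t : PvNode) :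
    pvAnyNot (PvNode.cons c v t) = ((!pvValMm v) || pvAnyNot t) := by rw [pvAnyNot]

theorem pvValMm_nd (m : PvNode) : pvValMm (PvVal.nd m) = pvMinmax m := by rw [pvValMm]

-- filtering out a non-'.' key class does not change whether a '.'-keyed word exists
theorem pv_any_dot_others (c : Char) (hc : c ≠ '.') (W : List (List Char)) :
    (pvOthersW c W).any (fun u => pvKey u == '.') = W.any (fun u => pvKey u == '.') := by
  rw [pvOthersW, List.any_filter]
  congr 1
  funext u
  by_cases hu : pvKey u = '.'
  · simp [hu, Ne.symm hc]
  · simp [hu]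

-- —— the end flag of the built trie ——

theorem pv_hasEnd_build : ∀ (f : Nat) (W : List (List Char)), pvM W < f →
    pvHasEnd (pvBuildN f W) = W.any (fun w => pvKey w == '.') := by
  intro f
  induction f with
  | zero => intro W h; omega
  | succ f ih =>
    intro W hm
    match W with
    | [] => simp [pvBuildN, pvHasEnd]
    | w :: W' =>
      have hsum : pvSumLen (w :: W') = w.length + pvSumLen W' := by simp [pvSumLen]
      have hOs := pv_others_sum (pvKey w) W'
      have hOl : (pvOthersW (pvKey w) W').length ≤ W'.length := List.length_filter_le _ _
      have hoth : pvOthersW (pvKey w) (w :: W') = pvOthersW (pvKey w) W' :=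
        pv_others_cons_self _ w W' rfl
      have ihO := ih (pvOthersW (pvKey w) W') (by simp [pvM] at *; omega)
      have hBuild : pvBuildN (f + 1) (w :: W')
          = PvNode.cons (pvKey w) _ (pvBuildN f (pvOthersW (pvKey w) (w :: W'))) := rfl
      rw [hBuild, pvHasEnd, hoth, ihO]
      by_cases hd : pvKey w = '.'
      · simp [hd]
      · rw [pv_any_dot_others _ hd W', List.any_cons]

-- —— bridging B's marked suffixes to the word lists ——

theorem pvMark_head (w : List Char) : (pvMark w).head? = some (pvKey w) := by
  cases w <;> simp [pvMark, pvKey]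

theorem pv_anyDot_mark (W : List (List Char)) :
    (W.map pvMark).any (fun t => t.head? == some '.') = W.any (fun w => pvKey w == '.') := by
  rw [List.any_map]
  congr 1
  funext w
  simp [pvMark_head]

theorem pv_bucketM (c : Char) (hc : c ≠ '.') (W : List (List Char)) :
    (W.map pvMark).filterMap (fun t => match t with
                                       | [] => none
                                       | c' :: r => if c' = c then some r else none)
      = (pvBucketW c W).map pvMark := by
  rw [List.filterMap_map, pvBucketW, List.map_filterMap]
  apply List.filterMap_congr
  intro w _
  cases w with
  | nil => simp [Function.comp, pvMark, Ne.symm hc]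
  | cons cw rw =>
    by_cases h : cw = c
    · simp [Function.comp, pvMark, h]
    · simp [Function.comp, pvMark, h]

theorem pv_othersM (c : Char) (W : List (List Char)) :
    (W.map pvMark).filter (fun t => t.head? ≠ some c)
      = (pvOthersW c W).map pvMark := by
  rw [List.filter_map, pvOthersW]
  congr 1
  apply List.filter_congr
  intro w _
  simp [Function.comp, pvMark_head, pvKey]

-- —— the crux: minmax over the built trie is B's recursion ——

theorem pvMW : ∀ (fuel : Nat) (W : List (List Char)), pvM W < fuel →
    pvMinmax (pvBuildN fuel W) = pvWin fuel (W.map pvMark) := by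
  intro fuel
  induction fuel with
  | zero => intro W h; omega
  | succ f ih =>
    intro W hm
    match W with
    | [] => simp [pvBuildN, pvWin, pvMinmax_eq, pvHasEnd, pvAnyNot_nil]
    | w :: W' =>
      have hE := pv_hasEnd_build (f + 1) (w :: W') hm
      have hmark : (w :: W').map pvMark = pvMark w :: W'.map pvMark := rfl
      by_cases hAny : (w :: W').any (fun u => pvKey u == '.') = true
      · have hwin : pvWin (f + 1) ((w :: W').map pvMark) = true := by
          rw [hmark]
          show (if (pvMark w :: W'.map pvMark).any (fun t => t.head? == some '.') then true
                else _) = true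
          rw [show (pvMark w :: W'.map pvMark) = (w :: W').map pvMark from rfl,
              pv_anyDot_mark, hAny]
          rfl
        rw [hwin, pvMinmax_eq, hE, hAny]
        rfl
      · have hAny' : (w :: W').any (fun u => pvKey u == '.') = false := by
          revert hAny; cases ((w :: W').any (fun u => pvKey u == '.')) <;> simp
        have hkey : (pvKey w == '.') = false := by
          rw [List.any_cons] at hAny'
          exact (Bool.or_eq_false_iff.mp hAny').1
        match w with
        | [] => simp [pvKey] at hkey
        | c :: r =>
          have hc : c ≠ '.' := by simpa [pvKey] using hkey
          -- measures
          have hsum : pvSumLen ((c :: r) :: W') = r.length + 1 + pvSumLen W' := by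
            simp [pvSumLen]
          have hBs := pv_bucket_size c ((c :: r) :: W')
          have hOs := pv_others_sum c W'
          have hOl : (pvOthersW c W').length ≤ W'.length := List.length_filter_le _ _
          have hmB : pvM (pvBucketW c ((c :: r) :: W')) < f := by
            simp [pvM, pvSumLen] at *; omega
          have hmO : pvM (pvOthersW c W') < f := by
            simp [pvM] at *; omega
          have hoth : pvOthersW c ((c :: r) :: W') = pvOthersW c W' :=
            pv_others_cons_self c _ W' (by simp [pvKey])
          -- the A side, unfolded one level
          have hBuild : pvBuildN (f + 1) ((c :: r) :: W')
              = PvNode.cons c (PvVal.nd (pvBuildN f (pvBucketW c ((c :: r) :: W'))))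
                  (pvBuildN f (pvOthersW c ((c :: r) :: W'))) := by
            show PvNode.cons (pvKey (c :: r)) _ _ = _
            simp [pvKey, hc]
          have hEO : pvHasEnd (pvBuildN f (pvOthersW c W')) = false := by
            rw [pv_hasEnd_build f _ hmO, pv_any_dot_others c hc W']
            rw [List.any_cons] at hAny'
            exact (Bool.or_eq_false_iff.mp hAny').2
          -- the B side, unfolded one level
          have hwin : pvWin (f + 1) (((c :: r) :: W').map pvMark)
              = ((!pvWin f ((pvBucketW c ((c :: r) :: W')).map pvMark))
                  || pvWin f ((pvOthersW c ((c :: r) :: W')).map pvMark)) := by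
            have hmw : pvMark (c :: r) = c :: pvMark r := by simp [pvMark]
            rw [hmark, hmw]
            show (if ((c :: pvMark r) :: W'.map pvMark).any (fun t => t.head? == some '.') then true
                  else ((!pvWin f (((c :: pvMark r) :: W'.map pvMark).filterMap
                          (fun t => match t with
                                    | [] => none
                                    | c' :: r => if c' = c then some r else none)))
                        || pvWin f (((c :: pvMark r) :: W'.map pvMark).filter
                          (fun t => t.head? ≠ some c)))) = _
            rw [(show ((c :: pvMark r) :: W'.map pvMark) = ((c :: r) :: W').map pvMark from by
                  rw [hmark, hmw]),
                pv_anyDot_mark, hAny', pv_bucketM c hc, pv_othersM c]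
            rfl
          rw [hBuild, hwin, pvMinmax_eq]
          show (if pvHasEnd (PvNode.cons c _ _) then true else _) = _
          rw [(show pvHasEnd (PvNode.cons c (PvVal.nd (pvBuildN f (pvBucketW c ((c :: r) :: W'))))
                    (pvBuildN f (pvOthersW c ((c :: r) :: W')))) = false from hBuild ▸ (hE.trans hAny')),
              pvAnyNot_cons, pvValMm_nd, hoth]
          have hihB := ih (pvBucketW c ((c :: r) :: W')) hmB
          have hihO := ih (pvOthersW c W') hmO
          rw [hihB, ← hihO]
          simp [pvMinmax_eq, hEO]

-- —— arithmetic for the fuel solve_alt computes ——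

theorem pv_foldl_len (L : List (List Char)) : ∀ (a : Nat),
    L.foldl (fun n s => n + s.length) a = a + pvSumLen L := by
  induction L with
  | nil => simp [pvSumLen]
  | cons w L ih => intro a; simp [List.foldl_cons, ih, pvSumLen]; omega

theorem pv_sumLen_mark (W : List (List Char)) :
    pvSumLen (W.map pvMark) = pvSumLen W + W.length := by
  induction W with
  | nil => simp [pvSumLen]
  | cons w W ih => simp [pvSumLen, pvMark] at *; omega

-- ===== VERDICT (by name: the statement is the Claim_ definition above) =====
theorem solve_spec : Claim_equal_solve := by
  intro words _ hpre
  show solve words = solve_alt words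
  have hW : pvPre (words.map String.toList) := by
    rw [pvPre, List.pairwise_map]
    exact hpre.imp (fun {u v} h => by simpa [pvMark] using h)
  have hMM : (words.map (fun w => w.toList ++ ['.'])) = (words.map String.toList).map pvMark := by
    simp [pvMark]
  unfold solve solve_alt
  rw [hMM]
  rw [show (words.foldl (fun o w => o.bind (pvInsert? w.toList)) (some PvNode.nil))
        = pvF (words.map String.toList) (some PvNode.nil) from
      (List.foldl_map (f := String.toList)
        (g := fun (o : Option PvNode) (w : List Char) => o.bind (pvInsert? w))).symm]
  have hfuel : pvM (words.map String.toList)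
      < ((words.map String.toList).map pvMark).foldl (fun n s => n + s.length) 0
          + ((words.map String.toList).map pvMark).length + 1 := by
    rw [pv_foldl_len, pv_sumLen_mark]
    simp [pvM]
  rw [pvBuild _ (words.map String.toList) hfuel hW]
  exact pvMW _ (words.map String.toList) hfuel
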